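-- pv_equiv track=rewrite | github.com/whitetiger45/hashify | hashify.py | collect_differences
-- ===== SOURCE A (Python) =====
-- from typing import List, Iterable, Sequence, TextIO
--
-- def collect_differences(lines1: Sequence[str], lines2: Sequence[str]):
--     diff1: str = ''
--     """Lines in lines2 that don't exist in lines1."""
--
--     diff2 = ''
--     """Lines in lines1 that don't exist in lines2."""
--
--     index1: int = 0
--     len1: int = len(lines1)
--     index2: int = 0
--     len2: int = len(lines2)
--
--     while index1 < len1 or index2 < len2:
--         if index1 == len1:
--             if lines2[index2] not in lines1[index1:]:
--                 diff1 += f'[1->2 line {index2}]: {lines2[index2]}\n'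
--             index2 += 1
--         elif index2 == len2:
--             if lines1[index1] not in lines2[index2:]:
--                 diff2 += f'[2->1 line {index1}]: {lines1[index1]}\n'
--             index1 += 1
--         else:
--             if lines1[index1] != lines2[index2]:
--                 if lines2[index2] not in lines1[index1:]:
--                     diff1 += f'[1->2 line {index2}]: {lines2[index2]}\n'
--                 if lines1[index1] not in lines2[index2:]:
--                     diff2 += f'[2->1 line {index1}]: {lines1[index1]}\n'
--             index1 += 1
--             index2 += 1
--     return diff1, diff2
-- ===== SOURCE B (Python) =====
-- def collect_differences(lines1, lines2):
--     n1, n2 = len(lines1), len(lines2)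
--     seen1, seen2 = set(), set()
--     parts1, parts2 = [], []
--     for i in range(max(n1, n2) - 1, -1, -1):
--         if i < n1:
--             seen1.add(lines1[i])
--         if i < n2:
--             seen2.add(lines2[i])
--         if i < n1 and i < n2 and lines1[i] == lines2[i]:
--             continue
--         if i < n2 and lines2[i] not in seen1:
--             parts1.append(f'[1->2 line {i}]: {lines2[i]}\n')
--         if i < n1 and lines1[i] not in seen2:
--             parts2.append(f'[2->1 line {i}]: {lines1[i]}\n')
--     return ''.join(reversed(parts1)), ''.join(reversed(parts2))
-- ===== Notes on version B (the rewrite author's own statement) =====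
-- stated objective: faster
-- what changed: Replaced A's lockstep walk with O(n) suffix-membership scans (x in lines[i:]) by a single backward pass that maintains two seen-so-far sets, so each membership test is a set lookup; diff entries are collected in lists and joined at the end.
import Mathlib
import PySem

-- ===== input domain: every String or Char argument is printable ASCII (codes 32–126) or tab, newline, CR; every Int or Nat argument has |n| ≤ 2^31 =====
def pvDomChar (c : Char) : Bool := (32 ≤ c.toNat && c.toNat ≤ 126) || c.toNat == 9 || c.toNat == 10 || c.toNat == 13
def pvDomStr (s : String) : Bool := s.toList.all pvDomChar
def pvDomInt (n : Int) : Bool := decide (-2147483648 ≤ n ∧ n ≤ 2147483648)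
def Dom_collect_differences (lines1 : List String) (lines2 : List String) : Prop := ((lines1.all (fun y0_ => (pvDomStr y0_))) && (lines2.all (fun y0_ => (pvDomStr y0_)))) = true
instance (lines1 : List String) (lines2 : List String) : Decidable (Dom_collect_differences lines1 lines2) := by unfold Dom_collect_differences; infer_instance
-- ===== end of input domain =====

-- B replaces A's quadratic suffix-membership scans by one backward pass over the indices
-- maintaining two seen-so-far sets (objective: faster; measured).

-- ===== PORT A =====
-- A's while loop: state (index1, index2, diff1, diff2). The loop ends when both indices reach
-- their length; each iteration advances index1 or index2, so len1 + len2 steps always suffice: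
-- the fuel argument is len1 + len2 - index1 - index2 at every call and the 0 case is never the
-- one that stops the loop (the guard is re-checked every step, exactly as in the Python).
def cdLoopA (lines1 lines2 : List String) : Nat → Nat → Nat → String → String → String × String
  | 0, _, _, d1, d2 => (d1, d2)
  | fuel + 1, i1, i2, d1, d2 =>
    if i1 < lines1.length ∨ i2 < lines2.length then
      if i1 = lines1.length then
        let x := lines2.getD i2 ""
        let d1 := if ¬ (lines1.drop i1).contains x then
            d1 ++ "[1->2 line " ++ toString i2 ++ "]: " ++ x ++ "\n" else d1
        cdLoopA lines1 lines2 fuel i1 (i2 + 1) d1 d2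
      else if i2 = lines2.length then
        let x := lines1.getD i1 ""
        let d2 := if ¬ (lines2.drop i2).contains x then
            d2 ++ "[2->1 line " ++ toString i1 ++ "]: " ++ x ++ "\n" else d2
        cdLoopA lines1 lines2 fuel (i1 + 1) i2 d1 d2
      else
        let x1 := lines1.getD i1 ""
        let x2 := lines2.getD i2 ""
        let d1 := if x1 ≠ x2 ∧ ¬ (lines1.drop i1).contains x2 then
            d1 ++ "[1->2 line " ++ toString i2 ++ "]: " ++ x2 ++ "\n" else d1
        let d2 := if x1 ≠ x2 ∧ ¬ (lines2.drop i2).contains x1 then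
            d2 ++ "[2->1 line " ++ toString i1 ++ "]: " ++ x1 ++ "\n" else d2
        cdLoopA lines1 lines2 fuel (i1 + 1) (i2 + 1) d1 d2
    else (d1, d2)

def collect_differences (lines1 : List String) (lines2 : List String) : String × String :=
  cdLoopA lines1 lines2 (lines1.length + lines2.length) 0 0 "" ""

-- ===== PORT B =====
-- Source B's descending 'for i in range(max-1, -1, -1)' loop, ported as a countdown recursion:
-- goB (i+1) handles index i and recurses; state = (seen1, seen2, parts1, parts2).
def goB (lines1 lines2 : List String) : Nat → PySem.Set String → PySem.Set String →
    List String → List String → String × String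
  | 0, _, _, p1, p2 => (String.join p1.reverse, String.join p2.reverse)
  | i + 1, s1, s2, p1, p2 =>
    let s1 := if i < lines1.length then PySem.Set.add s1 (lines1.getD i "") else s1
    let s2 := if i < lines2.length then PySem.Set.add s2 (lines2.getD i "") else s2
    if i < lines1.length ∧ i < lines2.length ∧ lines1.getD i "" = lines2.getD i "" then
      goB lines1 lines2 i s1 s2 p1 p2
    else
      let p1 := if i < lines2.length ∧ ¬ PySem.Set.contains s1 (lines2.getD i "") then
          p1 ++ ["[1->2 line " ++ toString i ++ "]: " ++ lines2.getD i "" ++ "\n"] else p1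
      let p2 := if i < lines1.length ∧ ¬ PySem.Set.contains s2 (lines1.getD i "") then
          p2 ++ ["[2->1 line " ++ toString i ++ "]: " ++ lines1.getD i "" ++ "\n"] else p2
      goB lines1 lines2 i s1 s2 p1 p2

def collect_differences_alt (lines1 : List String) (lines2 : List String) : String × String :=
  goB lines1 lines2 (max lines1.length lines2.length) PySem.Set.empty PySem.Set.empty [] []

-- ===== PRECONDITION & SPEC =====
def Spec_collect_differences (lines1 : List String) (lines2 : List String) (out : String × String) : Prop := out = collect_differences_alt lines1 lines2
instance (lines1 : List String) (lines2 : List String) (out : String × String) : Decidable (Spec_collect_differences lines1 lines2 out) := by unfold Spec_collect_differences; infer_instance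

-- ===== CLAIM (what is proved, stated in full; the proofs are below) =====
def Claim_equal_collect_differences : Prop := ∀ (lines1 : List String) (lines2 : List String), Dom_collect_differences lines1 lines2 → Spec_collect_differences lines1 lines2 (collect_differences lines1 lines2)

-- ===== LEMMAS AND PROOFS =====

-- the entry contributed by index i to diff1 (resp. diff2); "" when nothing is added
def ent1 (lines1 lines2 : List String) (i : Nat) : String :=
  if i < lines2.length ∧ ¬ (lines1.drop i).contains (lines2.getD i "") then
    "[1->2 line " ++ toString i ++ "]: " ++ lines2.getD i "" ++ "\n" else ""
def ent2 (lines1 lines2 : List String) (i : Nat) : String :=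
  if i < lines1.length ∧ ¬ (lines2.drop i).contains (lines1.getD i "") then
    "[2->1 line " ++ toString i ++ "]: " ++ lines1.getD i "" ++ "\n" else ""

-- prefix accumulation of entries over [0, i)
def pre1 (lines1 lines2 : List String) : Nat → String
  | 0 => ""
  | i + 1 => pre1 lines1 lines2 i ++ ent1 lines1 lines2 i
def pre2 (lines1 lines2 : List String) : Nat → String
  | 0 => ""
  | i + 1 => pre2 lines1 lines2 i ++ ent2 lines1 lines2 i

-- suffix accumulation of c entries starting at index i
def suf1 (lines1 lines2 : List String) : Nat → Nat → String
  | 0, _ => ""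
  | c + 1, i => ent1 lines1 lines2 i ++ suf1 lines1 lines2 c (i + 1)
def suf2 (lines1 lines2 : List String) : Nat → Nat → String
  | 0, _ => ""
  | c + 1, i => ent2 lines1 lines2 i ++ suf2 lines1 lines2 c (i + 1)

theorem join_cons (a : String) (l : List String) : String.join (a :: l) = a ++ String.join l := by
  have key : ∀ (l : List String) (acc : String),
      l.foldl (fun r s => r ++ s) acc = acc ++ l.foldl (fun r s => r ++ s) "" := by
    intro l
    induction l with
    | nil => intro acc; simp [String.append_empty]
    | cons b t ih =>
      intro acc
      simp only [List.foldl_cons]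
      rw [ih (acc ++ b), ih ("" ++ b), String.empty_append, String.append_assoc]
  simp only [String.join, List.foldl_cons]
  rw [key l ("" ++ a), String.empty_append]

theorem pre_suf1 (l1 l2 : List String) : ∀ i, i ≤ max l1.length l2.length →
    pre1 l1 l2 i ++ suf1 l1 l2 (max l1.length l2.length - i) i
      = suf1 l1 l2 (max l1.length l2.length) 0 := by
  intro i
  induction i with
  | zero => intro _; rw [pre1, String.empty_append, Nat.sub_zero]
  | succ i ih =>
    intro h
    have hc : max l1.length l2.length - i = (max l1.length l2.length - (i + 1)) + 1 := by omega
    have hs : suf1 l1 l2 (max l1.length l2.length - i) i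
        = ent1 l1 l2 i ++ suf1 l1 l2 (max l1.length l2.length - (i + 1)) (i + 1) := by
      rw [hc, suf1]
    rw [pre1, String.append_assoc, ← hs, ih (by omega)]

theorem pre_suf2 (l1 l2 : List String) : ∀ i, i ≤ max l1.length l2.length →
    pre2 l1 l2 i ++ suf2 l1 l2 (max l1.length l2.length - i) i
      = suf2 l1 l2 (max l1.length l2.length) 0 := by
  intro i
  induction i with
  | zero => intro _; rw [pre2, String.empty_append, Nat.sub_zero]
  | succ i ih =>
    intro h
    have hc : max l1.length l2.length - i = (max l1.length l2.length - (i + 1)) + 1 := by omega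
    have hs : suf2 l1 l2 (max l1.length l2.length - i) i
        = ent2 l1 l2 i ++ suf2 l1 l2 (max l1.length l2.length - (i + 1)) (i + 1) := by
      rw [hc, suf2]
    rw [pre2, String.append_assoc, ← hs, ih (by omega)]

theorem drop_cons_getD (l : List String) (i : Nat) (h : i < l.length) :
    l.drop i = l.getD i "" :: l.drop (i + 1) := by
  rw [List.getD_eq_getElem l "" h]
  exact (List.getElem_cons_drop h).symm

theorem lemA (l1 l2 : List String) : ∀ (fuel i : Nat) (d1 d2 : String),
    max l1.length l2.length ≤ i + fuel →
    cdLoopA l1 l2 fuel (min i l1.length) (min i l2.length) d1 d2 =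
      (d1 ++ suf1 l1 l2 (max l1.length l2.length - i) i,
       d2 ++ suf2 l1 l2 (max l1.length l2.length - i) i) := by
  intro fuel
  induction fuel with
  | zero =>
    intro i d1 d2 h
    have hz : max l1.length l2.length - i = 0 := by omega
    rw [hz, cdLoopA, suf1, suf2, String.append_empty, String.append_empty]
  | succ fuel ih =>
    intro i d1 d2 h
    by_cases hm : i < max l1.length l2.length
    · have hc : max l1.length l2.length - i
          = (max l1.length l2.length - (i + 1)) + 1 := by omega
      have hsuf1 : suf1 l1 l2 (max l1.length l2.length - i) i
          = ent1 l1 l2 i ++ suf1 l1 l2 (max l1.length l2.length - (i + 1)) (i + 1) := by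
        rw [hc, suf1]
      have hsuf2 : suf2 l1 l2 (max l1.length l2.length - i) i
          = ent2 l1 l2 i ++ suf2 l1 l2 (max l1.length l2.length - (i + 1)) (i + 1) := by
        rw [hc, suf2]
      by_cases hn1 : i < l1.length <;> by_cases hn2 : i < l2.length
      · -- lockstep region
        have e1 : min i l1.length = i := by omega
        have e2 : min i l2.length = i := by omega
        rw [e1, e2, cdLoopA, if_pos (Or.inl hn1), if_neg (by omega), if_neg (by omega)]
        dsimp only
        rw [show (cdLoopA l1 l2 fuel (i + 1) (i + 1)) =
            (cdLoopA l1 l2 fuel (min (i + 1) l1.length) (min (i + 1) l2.length)) from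
          (by rw [Nat.min_eq_left (by omega), Nat.min_eq_left (by omega)])]
        rw [ih (i + 1) _ _ (by omega), hsuf1, hsuf2]
        have hd1 := drop_cons_getD l1 i hn1
        have hd2 := drop_cons_getD l2 i hn2
        rw [ent1, ent2]
        congr 1
        · split_ifs with hA hE hE
          · simp [String.append_assoc]
          · exact absurd ⟨hn2, hA.2⟩ hE
          · exfalso
            apply hE.2
            rw [hd1, List.contains_cons]
            have heq : l1.getD i "" = l2.getD i "" := by
              by_contra hne; exact hA ⟨hne, hE.2⟩
            rw [← heq]; simp
          · rw [String.empty_append]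
        · split_ifs with hA hE hE
          · simp [String.append_assoc]
          · exact absurd ⟨hn1, hA.2⟩ hE
          · exfalso
            apply hE.2
            rw [hd2, List.contains_cons]
            have heq : l1.getD i "" = l2.getD i "" := by
              by_contra hne; exact hA ⟨hne, hE.2⟩
            rw [heq]; simp
          · rw [String.empty_append]
      · -- only lines1 remains
        have e1 : min i l1.length = i := by omega
        have e2 : min i l2.length = l2.length := by omega
        rw [e1, e2, cdLoopA, if_pos (Or.inl hn1), if_neg (by omega), if_pos rfl]
        dsimp only
        rw [List.drop_length, List.contains_nil]
        rw [show (cdLoopA l1 l2 fuel (i + 1) l2.length) =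
            (cdLoopA l1 l2 fuel (min (i + 1) l1.length) (min (i + 1) l2.length)) from
          (by rw [Nat.min_eq_left (by omega), Nat.min_eq_right (by omega)])]
        rw [ih (i + 1) _ _ (by omega), hsuf1, hsuf2]
        have he1 : ent1 l1 l2 i = "" := by rw [ent1, if_neg (by omega)]
        have he2 : ent2 l1 l2 i =
            "[2->1 line " ++ toString i ++ "]: " ++ l1.getD i "" ++ "\n" := by
          rw [ent2, if_pos ⟨hn1, by rw [List.drop_eq_nil_of_le (by omega), List.contains_nil]; simp⟩]
        rw [he1, he2]
        simp [String.append_assoc, String.empty_append]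
      · -- only lines2 remains
        have e1 : min i l1.length = l1.length := by omega
        have e2 : min i l2.length = i := by omega
        rw [e1, e2, cdLoopA, if_pos (Or.inr hn2), if_pos rfl]
        dsimp only
        rw [List.drop_length, List.contains_nil]
        rw [show (cdLoopA l1 l2 fuel l1.length (i + 1)) =
            (cdLoopA l1 l2 fuel (min (i + 1) l1.length) (min (i + 1) l2.length)) from
          (by rw [Nat.min_eq_right (by omega), Nat.min_eq_left (by omega)])]
        rw [ih (i + 1) _ _ (by omega), hsuf1, hsuf2]
        have he2 : ent2 l1 l2 i = "" := by rw [ent2, if_neg (by omega)]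
        have he1 : ent1 l1 l2 i =
            "[1->2 line " ++ toString i ++ "]: " ++ l2.getD i "" ++ "\n" := by
          rw [ent1, if_pos ⟨hn2, by rw [List.drop_eq_nil_of_le (by omega), List.contains_nil]; simp⟩]
        rw [he1, he2]
        simp [String.append_assoc, String.empty_append]
      · omega
    · have e1 : min i l1.length = l1.length := by omega
      have e2 : min i l2.length = l2.length := by omega
      have hz : max l1.length l2.length - i = 0 := by omega
      rw [e1, e2, hz, cdLoopA, if_neg (by omega), suf1, suf2,
        String.append_empty, String.append_empty]

theorem inv_step (l : List String) (i : Nat) (s : PySem.Set String)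
    (hs : ∀ x, PySem.Set.contains s x = (l.drop (i + 1)).contains x) :
    ∀ x, PySem.Set.contains (if i < l.length then PySem.Set.add s (l.getD i "") else s) x
      = (l.drop i).contains x := by
  intro x
  by_cases hn : i < l.length
  · rw [if_pos hn, Bool.eq_iff_iff, PySem.Set.contains_iff, PySem.Set.mem_add,
      drop_cons_getD l i hn, List.contains_cons]
    have hmem : x ∈ s ↔ x ∈ l.drop (i + 1) := by
      rw [← PySem.Set.contains_iff, hs x, List.contains_iff_mem]
    simp only [Bool.or_eq_true, beq_iff_eq, List.contains_iff_mem, hmem]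
    tauto
  · rw [if_neg hn, hs x, List.drop_eq_nil_of_le (by omega), List.drop_eq_nil_of_le (by omega)]

theorem join_reverse_append (p : List String) (e : String) :
    String.join (p ++ [e]).reverse = e ++ String.join p.reverse := by
  rw [List.reverse_append, List.reverse_singleton, List.singleton_append, join_cons]

theorem lemB (l1 l2 : List String) : ∀ (i : Nat) (s1 s2 : PySem.Set String) (p1 p2 : List String),
    (∀ x, PySem.Set.contains s1 x = (l1.drop i).contains x) →
    (∀ x, PySem.Set.contains s2 x = (l2.drop i).contains x) →
    goB l1 l2 i s1 s2 p1 p2 =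
      (pre1 l1 l2 i ++ String.join p1.reverse, pre2 l1 l2 i ++ String.join p2.reverse) := by
  intro i
  induction i generalizing l1 l2 with
  | zero =>
    intro s1 s2 p1 p2 _ _
    simp only [goB, pre1, pre2, String.empty_append]
  | succ i ih =>
    intro s1 s2 p1 p2 hs1 hs2
    simp only [goB]
    have hinv1 := inv_step l1 i s1 hs1
    have hinv2 := inv_step l2 i s2 hs2
    have hpre1 : pre1 l1 l2 (i + 1) = pre1 l1 l2 i ++ ent1 l1 l2 i := by rw [pre1]
    have hpre2 : pre2 l1 l2 (i + 1) = pre2 l1 l2 i ++ ent2 l1 l2 i := by rw [pre2]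
    by_cases hmid : i < l1.length ∧ i < l2.length ∧ l1.getD i "" = l2.getD i ""
    · rw [if_pos hmid, ih l1 l2 _ _ _ _ hinv1 hinv2, hpre1, hpre2]
      obtain ⟨hn1, hn2, heq⟩ := hmid
      have he1 : ent1 l1 l2 i = "" := by
        rw [ent1, if_neg]
        rintro ⟨-, hc⟩
        exact hc (by rw [drop_cons_getD l1 i hn1, List.contains_cons, ← heq]; simp)
      have he2 : ent2 l1 l2 i = "" := by
        rw [ent2, if_neg]
        rintro ⟨-, hc⟩
        exact hc (by rw [drop_cons_getD l2 i hn2, List.contains_cons, heq]; simp)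
      rw [he1, he2, String.append_empty, String.append_empty]
    · rw [if_neg hmid]
      rw [hinv1 (l2.getD i ""), hinv2 (l1.getD i "")]
      rw [ih l1 l2 _ _ _ _ hinv1 hinv2, hpre1, hpre2, ent1, ent2]
      congr 1
      · split_ifs with hc
        · rw [join_reverse_append]
          simp [String.append_assoc]
        · rw [String.append_empty]
      · split_ifs with hc
        · rw [join_reverse_append]
          simp [String.append_assoc]
        · rw [String.append_empty]

-- ===== VERDICT (by name: the statement is the Claim_ definition above) =====
theorem collect_differences_spec : Claim_equal_collect_differences := by
  intro l1 l2 _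
  unfold Spec_collect_differences collect_differences collect_differences_alt
  have hA := lemA l1 l2 (l1.length + l2.length) 0 "" "" (by omega)
  simp only [Nat.zero_min, Nat.sub_zero] at hA
  have hB := lemB l1 l2 (max l1.length l2.length) PySem.Set.empty PySem.Set.empty [] []
    (by intro x; rw [List.drop_eq_nil_of_le (by omega)]; rfl)
    (by intro x; rw [List.drop_eq_nil_of_le (by omega)]; rfl)
  rw [hA, hB]
  rw [← pre_suf1 l1 l2 (max l1.length l2.length) (by omega),
      ← pre_suf2 l1 l2 (max l1.length l2.length) (by omega)]
  have e1 : suf1 l1 l2 (max l1.length l2.length - max l1.length l2.length)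
      (max l1.length l2.length) = "" := by rw [Nat.sub_self, suf1]
  have e2 : suf2 l1 l2 (max l1.length l2.length - max l1.length l2.length)
      (max l1.length l2.length) = "" := by rw [Nat.sub_self, suf2]
  rw [e1, e2]
  simp [String.empty_append, String.append_empty, String.join]
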